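-- pv_equiv track=rewrite | github.com/prakash9047/AI_Compilane_project | backend/app/engines/compliance/compliance_engine.py | _find_relevant_segments
-- ===== SOURCE A (Python) =====
-- from typing import Dict, List
--
-- def _find_relevant_segments(rule: Dict, segments: List[Dict]) -> List[Dict]:
--     """Find document segments relevant to a compliance rule."""
--     relevant = []
--
--     # Get keywords from rule
--     keywords = rule.get("keywords", [])
--
--     for segment in segments:
--         content_lower = segment.get("content", "").lower()
--         title_lower = segment.get("title", "").lower()
--
--         # Check if any keyword matches
--         if any(keyword.lower() in content_lower or keyword.lower() in title_lower for keyword in keywords):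
--             relevant.append(segment)
--
--     return relevant
-- ===== SOURCE B (Python) =====
-- def _find_relevant_segments(rule, segments):
--     """Find document segments relevant to a compliance rule."""
--     keywords = [k.lower() for k in rule.get("keywords", [])]
--     texts = [(seg.get("content", "").lower(), seg.get("title", "").lower())
--              for seg in segments]
--     matched = set()
--     for kw in keywords:
--         for i, (content, title) in enumerate(texts):
--             if i not in matched and (kw in content or kw in title):
--                 matched.add(i)
--     return [seg for i, seg in enumerate(segments) if i in matched]
-- ===== Notes on version B (the rewrite author's own statement) =====
-- stated objective: alternative
-- what changed: B inverts the loop nesting: it lowers keywords and segment texts once up front, runs a keyword-major marking pass that records matched segment indices in a set (skipping already-matched indices), then collects the marked segments in one in-order pass, whereas A loops segment-major and re-lowers every keyword for every segment.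
import Mathlib
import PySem

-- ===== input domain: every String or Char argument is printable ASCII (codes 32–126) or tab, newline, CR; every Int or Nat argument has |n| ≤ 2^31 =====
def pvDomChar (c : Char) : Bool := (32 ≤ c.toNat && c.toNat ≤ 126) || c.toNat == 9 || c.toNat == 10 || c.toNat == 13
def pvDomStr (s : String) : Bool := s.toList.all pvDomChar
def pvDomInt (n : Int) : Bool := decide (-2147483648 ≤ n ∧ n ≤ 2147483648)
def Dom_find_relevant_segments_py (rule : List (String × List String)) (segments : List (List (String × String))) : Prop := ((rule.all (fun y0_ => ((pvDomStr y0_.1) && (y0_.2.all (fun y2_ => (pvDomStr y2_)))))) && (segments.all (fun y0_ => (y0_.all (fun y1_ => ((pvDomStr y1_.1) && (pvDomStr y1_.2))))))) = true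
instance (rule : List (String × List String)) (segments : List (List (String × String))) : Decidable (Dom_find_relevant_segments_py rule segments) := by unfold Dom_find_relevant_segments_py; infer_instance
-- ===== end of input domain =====

-- B: keyword-major marking pass over pre-lowered texts with a matched-index set, then one
-- in-order collection — instead of A's segment-major loop re-lowering keywords per segment
-- (objective: alternative).


-- ===== PORT A =====
def find_relevant_segments_py (rule : List (String × List String)) (segments : List (List (String × String))) : List (List (String × String)) :=
  let keywords := PySem.Dict.getD (PySem.Dict.mk rule) "keywords" []
  segments.foldl (fun relevant segment =>
    let content_lower := PySem.Str.lower (PySem.Dict.getD (PySem.Dict.mk segment) "content" "")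
    let title_lower := PySem.Str.lower (PySem.Dict.getD (PySem.Dict.mk segment) "title" "")
    if keywords.any (fun keyword =>
        PySem.Str.isIn (PySem.Str.lower keyword) content_lower ||
        PySem.Str.isIn (PySem.Str.lower keyword) title_lower)
    then relevant ++ [segment] else relevant) []

-- ===== PORT B =====
def find_relevant_segments_py_alt (rule : List (String × List String)) (segments : List (List (String × String))) : List (List (String × String)) :=
  let keywords := (PySem.Dict.getD (PySem.Dict.mk rule) "keywords" []).map (fun k => PySem.Str.lower k)
  let texts := segments.map (fun seg =>
    (PySem.Str.lower (PySem.Dict.getD (PySem.Dict.mk seg) "content" ""),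
     PySem.Str.lower (PySem.Dict.getD (PySem.Dict.mk seg) "title" "")))
  let matched : PySem.Set Int := keywords.foldl (fun matched kw =>
    (PySem.List.enumerate texts).foldl (fun matched x =>
      if !(PySem.Set.contains matched x.1) && (PySem.Str.isIn kw x.2.1 || PySem.Str.isIn kw x.2.2)
      then PySem.Set.add matched x.1 else matched) matched) PySem.Set.empty
  (PySem.List.enumerate segments).foldl (fun acc x =>
    if PySem.Set.contains matched x.1 then acc ++ [x.2] else acc) []

-- ===== PRECONDITION & SPEC =====
def Spec_find_relevant_segments_py (rule : List (String × List String)) (segments : List (List (String × String))) (out : List (List (String × String))) : Prop := out = find_relevant_segments_py_alt rule segments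
instance (rule : List (String × List String)) (segments : List (List (String × String))) (out : List (List (String × String))) : Decidable (Spec_find_relevant_segments_py rule segments out) := by unfold Spec_find_relevant_segments_py; infer_instance

-- ===== CLAIM =====
def Claim_equal_find_relevant_segments_py : Prop := ∀ (rule : List (String × List String)) (segments : List (List (String × String))), Dom_find_relevant_segments_py rule segments → Spec_find_relevant_segments_py rule segments (find_relevant_segments_py rule segments)

-- ===== LEMMAS AND PROOFS =====

theorem pvContains_iff {α : Type} [BEq α] [LawfulBEq α] (s : PySem.Set α) (j : α) :
    PySem.Set.contains s j = true ↔ j ∈ s := by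
  simp [PySem.Set.contains]

-- One conditional-mark step on the set.
theorem pvMark_step_mem (s : PySem.Set Int) (i j : Int) (b : Bool) :
    (j ∈ if !(PySem.Set.contains s i) && b then PySem.Set.add s i else s)
      ↔ (j ∈ s ∨ (i = j ∧ b = true)) := by
  by_cases hcond : (!(PySem.Set.contains s i) && b) = true
  · rw [if_pos hcond, PySem.Set.mem_add]
    have hb : b = true := ((Bool.and_eq_true _ _).mp hcond).2
    constructor
    · rintro (h | rfl) <;> [exact Or.inl h; exact Or.inr ⟨rfl, hb⟩]
    · rintro (h | ⟨rfl, _⟩) <;> [exact Or.inl h; exact Or.inr rfl]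
  · rw [if_neg hcond]
    have hor : PySem.Set.contains s i = true ∨ b = false := by
      rcases hb : b with _ | _
      · exact Or.inr rfl
      · rcases hc : PySem.Set.contains s i with _ | _
        · exact absurd (by rw [hc, hb]; rfl) hcond
        · exact Or.inl rfl
    constructor
    · exact Or.inl
    · rintro (h | ⟨rfl, hb⟩)
      · exact h
      · rcases hor with hc | hf
        · exact (pvContains_iff _ _).mp hc
        · simp [hf] at hb

-- One marking pass for a fixed keyword: index j ends up in the set iff it was already there
-- or some enumerated pair with index j satisfies the test.
theorem pvMark_fold_mem {α : Type} (q : α → Bool) (l : List (Int × α)) (s : PySem.Set Int) (j : Int) :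
    (j ∈ l.foldl (fun s x => if !(PySem.Set.contains s x.1) && q x.2
        then PySem.Set.add s x.1 else s) s)
      ↔ (j ∈ s ∨ ∃ x ∈ l, x.1 = j ∧ q x.2 = true) := by
  induction l generalizing s with
  | nil => simp
  | cons a l ih =>
    rw [List.foldl_cons, ih, pvMark_step_mem]
    simp only [List.mem_cons]
    constructor
    · rintro ((h | ⟨hj, hq⟩) | ⟨x, hx, hj, hq⟩)
      · exact Or.inl h
      · exact Or.inr ⟨a, Or.inl rfl, hj, hq⟩
      · exact Or.inr ⟨x, Or.inr hx, hj, hq⟩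
    · rintro (h | ⟨x, (rfl | hx), hj, hq⟩)
      · exact Or.inl (Or.inl h)
      · exact Or.inl (Or.inr ⟨hj, hq⟩)
      · exact Or.inr ⟨x, hx, hj, hq⟩

-- All keyword passes: j is marked iff some keyword marks it.
theorem pvMark_all_mem {α : Type} (Q : String → α → Bool) (ks : List String)
    (l : List (Int × α)) (s : PySem.Set Int) (j : Int) :
    (j ∈ ks.foldl (fun s kw => l.foldl (fun s x => if !(PySem.Set.contains s x.1) && Q kw x.2
        then PySem.Set.add s x.1 else s) s) s)
      ↔ (j ∈ s ∨ ∃ kw ∈ ks, ∃ x ∈ l, x.1 = j ∧ Q kw x.2 = true) := by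
  induction ks generalizing s with
  | nil => simp
  | cons k ks ih =>
    rw [List.foldl_cons, ih, pvMark_fold_mem]
    simp only [List.mem_cons]
    constructor
    · rintro ((h | ⟨x, hx, hj, hq⟩) | ⟨kw, hkw, hx⟩)
      · exact Or.inl h
      · exact Or.inr ⟨k, Or.inl rfl, x, hx, hj, hq⟩
      · exact Or.inr ⟨kw, Or.inr hkw, hx⟩
    · rintro (h | ⟨kw, (rfl | hkw), hx⟩)
      · exact Or.inl (Or.inl h)
      · exact Or.inl (Or.inr hx)
      · exact Or.inr ⟨kw, hkw, hx⟩

-- In 'enumerate l s', exactly one pair carries index s + k, and its payload is l[k].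
theorem pvEnum_exists_idx {α : Type} (q : α → Bool) (l : List α) (s : Int) (k : Nat)
    (hk : k < l.length) :
    ((∃ x ∈ PySem.List.enumerate l s, x.1 = s + (k : Int) ∧ q x.2 = true) ↔ q l[k] = true) := by
  constructor
  · rintro ⟨x, hx, hj, hq⟩
    rcases (PySem.List.mem_enumerate_iff l s x).mp hx with ⟨k', hk', rfl⟩
    simp only at hj hq
    have : k' = k := by omega
    subst this; exact hq
  · intro hq
    exact ⟨(s + (k : Int), l[k]), (PySem.List.mem_enumerate_iff l s _).mpr ⟨k, hk, rfl⟩, rfl, hq⟩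

-- The collection pass keeps l[k] exactly when the index test holds at s + k.
theorem pvCollect_filter {α : Type} (Q : Int → Bool) (P : α → Bool) (l : List α) (s : Int)
    (h : ∀ (k : Nat) (hk : k < l.length), Q (s + (k : Int)) = P l[k]) :
    (PySem.List.enumerate l s).foldl (fun acc x => if Q x.1 then acc ++ [x.2] else acc) []
      = l.filter P := by
  induction l generalizing s with
  | nil => simp [PySem.List.enumerate]
  | cons a l ih =>
    have h' : ∀ (k : Nat) (hk : k < l.length), Q (s + 1 + (k : Int)) = P l[k] := by
      intro k hk
      have := h (k + 1) (by simpa using Nat.succ_lt_succ hk)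
      push_cast at this ⊢
      rw [show s + 1 + (k : Int) = s + ((k : Int) + 1) by ring]
      simpa using this
    have h0 : Q s = P a := by simpa using h 0 (by simp)
    have hih := ih (s + 1) h'
    rw [PySem.List.enumerate_cons, List.foldl_cons, List.filter_cons, h0]
    by_cases hp : P a = true
    · rw [hp, if_pos rfl, if_pos rfl]
      rw [PySem.List.foldl_append_if (fun (x : Int × α) => Q x.1) (fun (x : Int × α) => x.2)]
      rw [PySem.List.foldl_append_if (fun (x : Int × α) => Q x.1) (fun (x : Int × α) => x.2)] at hih
      rw [List.nil_append] at hih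
      rw [hih]
      rfl
    · simp only [Bool.not_eq_true] at hp
      rw [hp, if_neg (by simp), if_neg (by simp)]
      exact hih

-- ===== VERDICT =====
set_option maxHeartbeats 1000000 in
theorem find_relevant_segments_py_spec : Claim_equal_find_relevant_segments_py := by
  intro rule segments _
  show find_relevant_segments_py rule segments = find_relevant_segments_py_alt rule segments
  simp only [find_relevant_segments_py, find_relevant_segments_py_alt]
  rw [PySem.List.foldl_append_if_eq_filter, List.nil_append]
  refine (pvCollect_filter _ _ segments 0 ?_).symm
  intro k hk
  apply Bool.eq_iff_iff.mpr
  rw [pvContains_iff]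
  rw [pvMark_all_mem (fun kw (t : String × String) => PySem.Str.isIn kw t.1 || PySem.Str.isIn kw t.2)]
  have hlen : k < (segments.map (fun seg =>
      (PySem.Str.lower (PySem.Dict.getD (PySem.Dict.mk seg) "content" ""),
       PySem.Str.lower (PySem.Dict.getD (PySem.Dict.mk seg) "title" "")))).length := by
    simpa using hk
  constructor
  · rintro (h | ⟨kw, hkw, hx⟩)
    · simp [PySem.Set.empty] at h
    · rcases List.mem_map.mp hkw with ⟨k0, hk0, rfl⟩
      have := (pvEnum_exists_idx (fun (t : String × String) => PySem.Str.isIn (PySem.Str.lower k0) t.1 || PySem.Str.isIn (PySem.Str.lower k0) t.2) _ 0 k hlen).mp hx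
      rw [List.getElem_map] at this
      simp only at this
      exact List.any_eq_true.mpr ⟨k0, hk0, by simpa using this⟩
  · intro hPk
    rcases List.any_eq_true.mp hPk with ⟨k0, hk0, hq⟩
    refine Or.inr ⟨PySem.Str.lower k0, List.mem_map.mpr ⟨k0, hk0, rfl⟩, ?_⟩
    exact (pvEnum_exists_idx (fun (t : String × String) => PySem.Str.isIn (PySem.Str.lower k0) t.1 || PySem.Str.isIn (PySem.Str.lower k0) t.2) _ 0 k hlen).mpr (by rw [List.getElem_map]; simpa using hq)
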